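-- pv_equiv track=rewrite | github.com/aimclub/evoguess-ai | core/impl/combine_t.py | is_unsat
-- ===== SOURCE A (Python) =====
-- from typing import Any, List, Dict, Optional, Tuple
--
-- def is_unsat(clause: List[int], value_map: Dict[int, int]) -> bool:
--     size = len(clause)
--     for literal in clause:
--         value = value_map.get(abs(literal))
--         if literal == value:
--             return False
--         if value is not None:
--             size -= 1
--     return True if size == 0 else None
-- ===== SOURCE B (Python) =====
-- from typing import List, Dict, Optional
--
-- def is_unsat(clause: List[int], value_map: Dict[int, int]) -> bool:
--     if any(lit == value_map.get(abs(lit)) for lit in clause):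
--         return False
--     return True if all(value_map.get(abs(lit)) is not None for lit in clause) else None
-- ===== Notes on version B (the rewrite author's own statement) =====
-- stated objective: idiomatic
-- what changed: Replaced the counter-carrying single loop with two declarative scans: any() detects a satisfied literal, then all() decides between True (fully assigned, unsatisfied) and None (some literal unassigned).
import Mathlib
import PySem

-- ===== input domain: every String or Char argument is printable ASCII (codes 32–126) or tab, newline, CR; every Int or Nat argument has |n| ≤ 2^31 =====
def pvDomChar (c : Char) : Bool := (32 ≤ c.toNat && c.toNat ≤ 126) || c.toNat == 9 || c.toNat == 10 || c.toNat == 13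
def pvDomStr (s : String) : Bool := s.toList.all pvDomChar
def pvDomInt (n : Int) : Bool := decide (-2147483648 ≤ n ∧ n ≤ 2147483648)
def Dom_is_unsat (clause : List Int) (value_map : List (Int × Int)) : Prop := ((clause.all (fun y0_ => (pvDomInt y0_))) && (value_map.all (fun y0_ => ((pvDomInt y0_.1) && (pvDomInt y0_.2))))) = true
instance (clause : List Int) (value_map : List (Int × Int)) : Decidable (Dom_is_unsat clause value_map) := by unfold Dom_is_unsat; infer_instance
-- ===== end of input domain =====

-- B replaces A's counter-carrying single loop with two declarative scans (any / all); objective: idiomatic, same cost.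

-- ===== PORT A =====
-- the for-loop with early return and the mutable 'size' counter, as structural recursion
def isUnsatLoop (vm : PySem.Dict Int Int) : List Int → Int → Option Bool
  | [], size => if size = 0 then some true else none
  | literal :: rest, size =>
    let value := vm.get? |literal|
    if value = some literal then some false
    else isUnsatLoop vm rest (if value.isSome then size - 1 else size)

def is_unsat (clause : List Int) (value_map : List (Int × Int)) : Option Bool :=
  isUnsatLoop (PySem.Dict.ofList value_map) clause (clause.length : Int)

-- ===== PORT B =====
def is_unsat_alt (clause : List Int) (value_map : List (Int × Int)) : Option Bool :=
  let d := PySem.Dict.ofList value_map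
  if clause.any (fun lit => d.get? |lit| == some lit) then some false
  else if clause.all (fun lit => (d.get? |lit|).isSome) then some true else none

-- ===== PRECONDITION & SPEC =====
def Spec_is_unsat (clause : List Int) (value_map : List (Int × Int)) (out : Option Bool) : Prop := out = is_unsat_alt clause value_map
instance (clause : List Int) (value_map : List (Int × Int)) (out : Option Bool) : Decidable (Spec_is_unsat clause value_map out) := by unfold Spec_is_unsat; infer_instance

-- ===== CLAIM (what is proved, stated in full; the proofs are below) =====
def Claim_equal_is_unsat : Prop := ∀ (clause : List Int) (value_map : List (Int × Int)), Dom_is_unsat clause value_map → Spec_is_unsat clause value_map (is_unsat clause value_map)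

-- ===== LEMMAS AND PROOFS =====

-- the loop's result, characterised: first a satisfied-literal test, then the counter check,
-- where the final counter value is s minus the number of assigned literals.
theorem isUnsatLoop_eq (vm : PySem.Dict Int Int) (cl : List Int) (s : Int) :
    isUnsatLoop vm cl s =
      if cl.any (fun lit => vm.get? |lit| == some lit) then some false
      else if s = ((cl.filter (fun lit => (vm.get? |lit|).isSome)).length : Int) then some true
      else none := by
  induction cl generalizing s with
  | nil => simp [isUnsatLoop]
  | cons l ls ih =>
    simp only [isUnsatLoop, List.any_cons, List.filter_cons]
    by_cases hsat : vm.get? |l| = some l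
    · simp [hsat]
    · have hb : (vm.get? |l| == some l) = false := by simpa using hsat
      rw [if_neg hsat, ih, hb]
      by_cases hs : (vm.get? |l|).isSome
      · simp only [hs, if_true, Bool.false_or, List.length_cons]
        split_ifs <;> first | rfl | omega
      · simp only [hs, Bool.false_eq_true, if_false, Bool.false_or]

theorem is_unsat_spec' (clause : List Int) (value_map : List (Int × Int)) :
    is_unsat clause value_map = is_unsat_alt clause value_map := by
  unfold is_unsat is_unsat_alt
  rw [isUnsatLoop_eq]
  set d := PySem.Dict.ofList value_map
  by_cases hany : clause.any (fun lit => d.get? |lit| == some lit)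
  · simp [hany]
  · simp only [hany, Bool.false_eq_true, if_false]
    have hiff : (clause.filter (fun lit => (d.get? |lit|).isSome)).length = clause.length ↔
        (clause.all (fun lit => (d.get? |lit|).isSome)) = true := by
      rw [List.length_filter_eq_length_iff, List.all_eq_true]
    split_ifs with h1 h2 h2
    · rfl
    · exact absurd (hiff.mp (by omega)) h2
    · exact absurd (by exact_mod_cast (hiff.mpr h2).symm) h1
    · rfl

-- ===== VERDICT (by name: the statement is the Claim_ definition above) =====
theorem is_unsat_spec : Claim_equal_is_unsat := by
  intro clause value_map _
  exact is_unsat_spec' clause value_map
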